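-- pv_equiv track=rewrite | github.com/Musadalancikar/Codeforces-Python | 1538A-StoneGame.py | stone_game2
-- ===== SOURCE A (Python) =====
-- def stone_game2(n, lst):
--     lst_copy = lst.copy()
--     min_lst = min(lst_copy)
--     max_lst = max(lst_copy)
--     total = 0
--     for j in range(n):
--         if min_lst in lst_copy or max_lst in lst_copy:
--             lst_copy.remove(lst_copy[-1])
--             total += 1
--         else:
--             break
--     return total
-- ===== SOURCE B (Python) =====
-- from collections import Counter
--
-- def stone_game2(n, lst):
--     lo = min(lst)
--     hi = max(lst)
--     cnt = Counter(lst)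
--     seen = set()
--     s = 0
--     for v in reversed(lst):
--         if v not in seen:
--             seen.add(v)
--             s += cnt[v]
--             if lo in seen and hi in seen:
--                 break
--     return min(max(n, 0), s)
-- ===== Notes on version B (the rewrite author's own statement) =====
-- stated objective: faster
-- what changed: Replaces A's per-step simulation (a linear membership scan and a remove-first-occurrence per removed element) by a Counter built once plus a single right-to-left scan over distinct values that sums class sizes until both the min and the max value have been seen, capping the sum with n arithmetically.
import Mathlib
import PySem

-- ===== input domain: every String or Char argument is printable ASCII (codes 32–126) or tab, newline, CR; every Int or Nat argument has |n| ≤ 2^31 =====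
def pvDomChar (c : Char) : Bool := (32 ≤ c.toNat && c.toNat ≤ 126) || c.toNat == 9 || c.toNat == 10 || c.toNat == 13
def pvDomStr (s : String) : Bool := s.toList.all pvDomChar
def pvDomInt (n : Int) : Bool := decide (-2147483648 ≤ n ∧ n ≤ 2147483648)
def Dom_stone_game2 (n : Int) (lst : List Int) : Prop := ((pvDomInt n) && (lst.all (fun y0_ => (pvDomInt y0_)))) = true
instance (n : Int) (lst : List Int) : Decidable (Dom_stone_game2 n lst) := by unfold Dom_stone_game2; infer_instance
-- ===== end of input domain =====

-- B replaces A's per-element simulation (scan-for-membership + remove-first-occurrence each step)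
-- by one counting pass: a Counter plus a single right-to-left scan over distinct values; objective: faster.

-- ===== PORT A =====
-- the 'for j in range(n)' loop of A: fuel = remaining iterations, state = (lst_copy, total); break = return total
def pvLoopA (mn mx : Int) : Nat → List Int → Int → Int
  | 0, _, total => total
  | f + 1, cur, total =>
    if mn ∈ cur ∨ mx ∈ cur then
      match PySem.List.pyGet? cur (-1) with      -- lst_copy[-1]
      | none => total                            -- unreachable: the membership test implies cur ≠ []
      | some v =>
        match PySem.List.remove? cur v with      -- lst_copy.remove(…): first occurrence
        | none => total                          -- unreachable: v ∈ cur
        | some cur' => pvLoopA mn mx f cur' (total + 1)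
    else total

def stone_game2 (n : Int) (lst : List Int) : Int :=
  match PySem.List.min? lst (fun x => x), PySem.List.max? lst (fun x => x) with
  | some mn, some mx => pvLoopA mn mx n.toNat lst 0
  | _, _ => 0      -- Python raises ValueError here (lst = []); excluded by Pre_

-- ===== PORT B =====
-- B's 'for v in reversed(lst)' loop: seen = set of values already counted, s = running sum; break = return
def pvLoopB (cnt : PySem.Dict Int Int) (lo hi : Int) : List Int → PySem.Set Int → Int → Int
  | [], _, s => s
  | v :: rest, seen, s =>
    if PySem.Set.contains seen v then pvLoopB cnt lo hi rest seen s
    else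
      let seen' := PySem.Set.add seen v
      let s' := s + cnt.getD v 0
      if PySem.Set.contains seen' lo ∧ PySem.Set.contains seen' hi then s'
      else pvLoopB cnt lo hi rest seen' s'

def stone_game2_alt (n : Int) (lst : List Int) : Int :=
  match PySem.List.min? lst (fun x => x) with
  | none => 0      -- Python raises ValueError here (lst = []); excluded by Pre_
  | some lo =>
    match PySem.List.max? lst (fun x => x) with
    | none => 0
    | some hi =>
      let cnt := PySem.Dict.counter lst
      let s := pvLoopB cnt lo hi lst.reverse PySem.Set.empty 0
      min (max n 0) s

-- ===== PRECONDITION & SPEC =====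
-- Pre_ excludes only lst = [], where Python A raises ValueError in min()
def Pre_stone_game2 (n : Int) (lst : List Int) : Prop := lst ≠ []
instance (n : Int) (lst : List Int) : Decidable (Pre_stone_game2 n lst) := by unfold Pre_stone_game2; infer_instance
def pvWitness_stone_game2 : Int × List Int := (3, [1, 2, 1, 3])

def Spec_stone_game2 (n : Int) (lst : List Int) (out : Int) : Prop := out = stone_game2_alt n lst
instance (n : Int) (lst : List Int) (out : Int) : Decidable (Spec_stone_game2 n lst out) := by unfold Spec_stone_game2; infer_instance

-- ===== CLAIM (what is proved, stated in full; the proofs are below) =====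
def Claim_equal_stone_game2 : Prop := ∀ (n : Int) (lst : List Int), Dom_stone_game2 n lst → Pre_stone_game2 n lst → Spec_stone_game2 n lst (stone_game2 n lst)

-- ===== LEMMAS AND PROOFS =====

-- fuel-free step count of A's loop: steps until neither mn nor mx is present
def pvRunA (mn mx : Int) (cur : List Int) : Nat :=
  if h : mn ∈ cur ∨ mx ∈ cur then
    have hne : cur ≠ [] := by rintro rfl; simp at h
    have : (cur.erase (cur.getLast hne)).length < cur.length := by
      have hm : cur.getLast hne ∈ cur := List.getLast_mem hne
      have := List.length_erase_of_mem hm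
      have hpos : 0 < cur.length := List.length_pos_iff.mpr hne
      omega
    1 + pvRunA mn mx (cur.erase (cur.getLast hne))
  else 0
termination_by cur.length

-- class-granular form: remove the whole value-class of the last element at once
def pvClassSum (mn mx : Int) (cur : List Int) : Nat :=
  if h : mn ∈ cur ∨ mx ∈ cur then
    have hne : cur ≠ [] := by rintro rfl; simp at h
    let v := cur.getLast hne
    have : (cur.filter (fun x => x ≠ v)).length < cur.length := by
      have hm : v ∈ cur := List.getLast_mem hne
      have hc : 0 < cur.count v := List.count_pos_iff.mpr hm
      have := List.length_filter_le (fun x => x ≠ v) cur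
      exact List.length_filter_lt_length_iff_exists.mpr ⟨v, hm, by simp⟩
    cur.count v + pvClassSum mn mx (cur.filter (fun x => x ≠ v))
  else 0
termination_by cur.length

lemma pvLoopA_eq_runA (mn mx : Int) : ∀ (f : Nat) (cur : List Int) (total : Int),
    pvLoopA mn mx f cur total = total + ((min f (pvRunA mn mx cur) : Nat) : Int) := by
  intro f
  induction f with
  | zero => intro cur total; simp [pvLoopA]
  | succ f ih =>
    intro cur total
    rw [pvRunA.eq_def]
    by_cases h : mn ∈ cur ∨ mx ∈ cur
    · have hne : cur ≠ [] := by rintro rfl; simp at h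
      have hget : PySem.List.pyGet? cur (-1) = some (cur.getLast hne) := by
        rw [PySem.List.pyGet?_neg_one, List.getLast?_eq_some_getLast hne]
      have hrem : PySem.List.remove? cur (cur.getLast hne) = some (cur.erase (cur.getLast hne)) :=
        PySem.List.remove?_eq_some_erase cur _ (List.getLast_mem hne)
      simp only [pvLoopA, h, if_pos, hget, hrem, dif_pos]
      rw [ih]
      have : min (f + 1) (1 + pvRunA mn mx (cur.erase (cur.getLast hne)))
           = 1 + min f (pvRunA mn mx (cur.erase (cur.getLast hne))) := by omega
      rw [this]; push_cast; ring
    · simp only [pvLoopA, h, if_neg, dif_neg, not_false_iff]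
      simp

lemma pvErase_eq_filter_of_count_le_one {v : Int} : ∀ (l : List Int), l.count v ≤ 1 →
    l.erase v = l.filter (fun x => x ≠ v) := by
  intro l
  induction l with
  | nil => simp
  | cons a t ih =>
    intro hc
    by_cases ha : a = v
    · subst ha
      have ht : t.count a = 0 := by simp [List.count_cons] at hc ⊢; omega
      have : t.filter (fun x => x ≠ a) = t :=
        List.filter_eq_self.mpr (fun x hx => by
          simp; rintro rfl; exact absurd (List.count_pos_iff.mpr hx) (by omega))
      rw [List.erase_cons_head, List.filter_cons_of_neg (by simp)]
      exact this.symm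
    · have : t.count v ≤ 1 := by simp [List.count_cons, ha] at hc ⊢; omega
      simp [List.erase_cons_tail (by simp [ha] : ¬ (a == v) = true), ih this, ha]

lemma pvFilter_erase {v : Int} : ∀ (l : List Int),
    (l.erase v).filter (fun x => x ≠ v) = l.filter (fun x => x ≠ v) := by
  intro l
  induction l with
  | nil => simp
  | cons a t ih =>
    by_cases ha : a = v
    · subst ha
      rw [List.erase_cons_head, List.filter_cons_of_neg (by simp)]
    · rw [List.erase_cons_tail (by simp [ha] : ¬ (a == v) = true),
          List.filter_cons_of_pos (by simp [ha]), List.filter_cons_of_pos (by simp [ha]), ih]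

lemma pvRunA_class (mn mx : Int) : ∀ (c : Nat) (cur : List Int) (v : Int) (hne : cur ≠ [])
    (hv : cur.getLast hne = v) (h : mn ∈ cur ∨ mx ∈ cur) (hc : cur.count v = c),
    pvRunA mn mx cur = c + pvRunA mn mx (cur.filter (fun x => x ≠ v)) := by
  intro c
  induction c with
  | zero =>
    intro cur v hne hv h hc
    exfalso
    have : v ∈ cur := hv ▸ List.getLast_mem hne
    have := List.count_pos_iff.mpr this
    omega
  | succ k ih =>
    intro cur v hne hv h hc
    rw [pvRunA.eq_def]
    rw [dif_pos h]
    show 1 + pvRunA mn mx (cur.erase (cur.getLast hne)) = k + 1 + pvRunA mn mx (cur.filter (fun x => x ≠ v))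
    rw [show cur.erase (cur.getLast hne) = cur.erase v from by rw [hv]]
    by_cases hk : k = 0
    · -- count v cur = 1 : erase = filter, and the class is finished after one step
      subst hk
      rw [pvErase_eq_filter_of_count_le_one cur (by omega)]
    · -- count v cur ≥ 2 : the last element is still v after the erase
      have hkpos : 0 < k := Nat.pos_of_ne_zero hk
      have hcount_erase : (cur.erase v).count v = k := by
        rw [List.count_erase_self]; omega
      have hvmem_erase : v ∈ cur.erase v := List.count_pos_iff.mp (by omega)
      have hne' : cur.erase v ≠ [] := by
        rintro habs; rw [habs] at hvmem_erase; simp at hvmem_erase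
      -- cur = dropLast ++ [v] and v occurs in dropLast, so erase acts on dropLast
      have hsplit : cur = cur.dropLast ++ [v] := by
        conv_lhs => rw [← List.dropLast_append_getLast hne, hv]
      have hvdrop : v ∈ cur.dropLast := by
        have : cur.count v = cur.dropLast.count v + 1 := by
          conv_lhs => rw [hsplit]
          simp [List.count_append]
        have : 0 < cur.dropLast.count v := by omega
        exact List.count_pos_iff.mp this
      have herase : cur.erase v = cur.dropLast.erase v ++ [v] := by
        conv_lhs => rw [hsplit]
        exact List.erase_append_left _ hvdrop
      have hlast' : (cur.erase v).getLast hne' = v := by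
        have h1 : (cur.erase v).getLast? = some v := by rw [herase]; simp
        have h2 := List.getLast?_eq_some_getLast hne'
        rw [h2] at h1
        exact Option.some.inj h1
      have hcond' : mn ∈ cur.erase v ∨ mx ∈ cur.erase v := by
        rcases h with hm | hm
        · left
          by_cases hmv : mn = v
          · subst hmv; exact hvmem_erase
          · exact (List.mem_erase_of_ne hmv).mpr hm
        · right
          by_cases hmv : mx = v
          · subst hmv; exact hvmem_erase
          · exact (List.mem_erase_of_ne hmv).mpr hm
      have := ih (cur.erase v) v hne' hlast' hcond' hcount_erase
      rw [this, pvFilter_erase cur]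
      omega

lemma pvRunA_eq_classSum (mn mx : Int) (cur : List Int) :
    pvRunA mn mx cur = pvClassSum mn mx cur := by
  suffices h : ∀ (k : Nat) (l : List Int), l.length ≤ k → pvRunA mn mx l = pvClassSum mn mx l from
    h cur.length cur le_rfl
  intro k
  induction k with
  | zero =>
    intro l hl
    have : l = [] := List.eq_nil_of_length_eq_zero (by omega)
    subst this
    rw [pvRunA.eq_def, pvClassSum.eq_def]
    simp
  | succ k ih =>
    intro l hl
    rw [pvClassSum.eq_def]
    by_cases h : mn ∈ l ∨ mx ∈ l
    · rw [dif_pos h]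
      have hne : l ≠ [] := by rintro rfl; simp at h
      show _ = l.count (l.getLast hne) + pvClassSum mn mx (l.filter (fun x => x ≠ l.getLast hne))
      rw [pvRunA_class mn mx (l.count (l.getLast hne)) l (l.getLast hne) hne rfl h rfl]
      have hlen : (l.filter (fun x => x ≠ l.getLast hne)).length ≤ k := by
        have : (l.filter (fun x => x ≠ l.getLast hne)).length < l.length :=
          List.length_filter_lt_length_iff_exists.mpr ⟨l.getLast hne, List.getLast_mem hne, by simp⟩
        omega
      rw [ih _ hlen]
    · rw [dif_neg h, pvRunA.eq_def, dif_neg h]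

lemma pvContains_false_iff (s : PySem.Set Int) (x : Int) :
    PySem.Set.contains s x = false ↔ x ∉ s := by
  rw [Bool.eq_false_iff, Ne, PySem.Set.contains_iff]

lemma pvLoopB_skip (cnt : PySem.Dict Int Int) (lo hi v : Int) : ∀ (l : List Int) (seen : PySem.Set Int) (s : Int),
    PySem.Set.contains seen v = true →
    pvLoopB cnt lo hi l seen s = pvLoopB cnt lo hi (l.filter (fun x => x ≠ v)) seen s := by
  intro l
  induction l with
  | nil => intro seen s _; simp
  | cons x t ih =>
    intro seen s hv
    by_cases hx : x = v
    · subst hx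
      rw [List.filter_cons_of_neg (by simp)]
      show pvLoopB cnt lo hi (x :: t) seen s = _
      rw [pvLoopB, if_pos hv]
      exact ih seen s hv
    · rw [List.filter_cons_of_pos (by simp [hx])]
      rw [pvLoopB, pvLoopB]
      by_cases hc : PySem.Set.contains seen x = true
      · rw [if_pos hc, if_pos hc]
        exact ih seen s hv
      · rw [if_neg hc, if_neg hc]
        have hv' : PySem.Set.contains (PySem.Set.add seen x) v = true := by
          rw [PySem.Set.contains_iff] at hv ⊢
          rw [PySem.Set.mem_add]
          exact Or.inl hv
        by_cases hb : PySem.Set.contains (PySem.Set.add seen x) lo = true ∧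
                      PySem.Set.contains (PySem.Set.add seen x) hi = true
        · simp only [hb, and_self, if_true]
        · simp only [if_neg hb]
          exact ih _ _ hv'

lemma pvLoopB_eq_classSum (mn mx : Int) : ∀ (k : Nat) (cur : List Int), cur.length ≤ k →
    ∀ (seen : PySem.Set Int) (s : Int) (cnt : PySem.Dict Int Int),
    (∀ x ∈ cur, PySem.Set.contains seen x = false) →
    (mn ∈ cur ∨ PySem.Set.contains seen mn = true) →
    (mx ∈ cur ∨ PySem.Set.contains seen mx = true) →
    ¬ (PySem.Set.contains seen mn = true ∧ PySem.Set.contains seen mx = true) →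
    (∀ x ∈ cur, cnt.getD x 0 = (cur.count x : Int)) →
    pvLoopB cnt mn mx cur.reverse seen s = s + ((pvClassSum mn mx cur : Nat) : Int) := by
  intro k
  induction k with
  | zero =>
    intro cur hl seen s cnt hdis hmn hmx hnot hcnt
    have : cur = [] := List.eq_nil_of_length_eq_zero (by omega)
    subst this
    exact absurd ⟨hmn.resolve_left (by simp), hmx.resolve_left (by simp)⟩ hnot
  | succ k ih =>
    intro cur hl seen s cnt hdis hmn hmx hnot hcnt
    by_cases hne : cur = []
    · subst hne
      exact absurd ⟨hmn.resolve_left (by simp), hmx.resolve_left (by simp)⟩ hnot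
    · have hvmem : cur.getLast hne ∈ cur := List.getLast_mem hne
      generalize hvdef : cur.getLast hne = v at hvmem
      have hsplit : cur = cur.dropLast ++ [v] := by
        conv_lhs => rw [← List.dropLast_append_getLast hne, hvdef]
      have hrev : cur.reverse = v :: cur.dropLast.reverse := by
        conv_lhs => rw [hsplit]
        simp
      have h : mn ∈ cur ∨ mx ∈ cur := by
        rcases not_and_or.mp hnot with hn | hn
        · left; exact hmn.resolve_right hn
        · right; exact hmx.resolve_right hn
      have hcv : PySem.Set.contains seen v = false := hdis v hvmem
      have hgetv : cnt.getD v 0 = (cur.count v : Int) := hcnt v hvmem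
      rw [hrev, pvLoopB, if_neg (by simp [(pvContains_false_iff seen v).mp hcv])]
      rw [pvClassSum.eq_def, dif_pos h]
      show (if PySem.Set.contains (PySem.Set.add seen v) mn = true ∧
               PySem.Set.contains (PySem.Set.add seen v) mx = true
            then s + cnt.getD v 0
            else pvLoopB cnt mn mx cur.dropLast.reverse (PySem.Set.add seen v) (s + cnt.getD v 0))
          = s + ((cur.count (cur.getLast hne) +
                  pvClassSum mn mx (cur.filter (fun x => x ≠ cur.getLast hne)) : Nat) : Int)
      rw [show cur.getLast hne = v from hvdef]
      by_cases hb : PySem.Set.contains (PySem.Set.add seen v) mn = true ∧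
                    PySem.Set.contains (PySem.Set.add seen v) mx = true
      · rw [if_pos hb]
        have hnb : ∀ y : Int, PySem.Set.contains (PySem.Set.add seen v) y = true →
            y ∉ cur.filter (fun x => x ≠ v) := by
          intro y hy hymem
          rw [List.mem_filter] at hymem
          have hyv : y ≠ v := by simpa using hymem.2
          rw [PySem.Set.contains_iff, PySem.Set.mem_add] at hy
          rcases hy with hy | hy
          · exact absurd (pvContains_false_iff seen y |>.mp (hdis y hymem.1)) (not_not_intro hy)
          · exact hyv hy
        rw [pvClassSum.eq_def, dif_neg (by
          rintro (hm | hm)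
          · exact hnb mn hb.1 hm
          · exact hnb mx hb.2 hm)]
        rw [hgetv]
        push_cast
        ring
      · rw [if_neg hb]
        have hv' : PySem.Set.contains (PySem.Set.add seen v) v = true := by
          rw [PySem.Set.contains_iff, PySem.Set.mem_add]
          exact Or.inr rfl
        rw [pvLoopB_skip cnt mn mx v cur.dropLast.reverse (PySem.Set.add seen v) (s + cnt.getD v 0) hv']
        have hfd : cur.filter (fun x => x ≠ v) = cur.dropLast.filter (fun x => x ≠ v) := by
          conv_lhs => rw [hsplit]
          simp
        have hfr : cur.dropLast.reverse.filter (fun x => x ≠ v)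
                 = (cur.filter (fun x => x ≠ v)).reverse := by
          rw [hfd]; exact List.filter_reverse
        rw [hfr]
        have hlt : (cur.filter (fun x => x ≠ v)).length < cur.length :=
          List.length_filter_lt_length_iff_exists.mpr ⟨v, hvmem, by simp⟩
        rw [ih (cur.filter (fun x => x ≠ v)) (by omega) (PySem.Set.add seen v) (s + cnt.getD v 0) cnt
            (by
              intro x hx
              rw [List.mem_filter] at hx
              have hxv : x ≠ v := by simpa using hx.2
              rw [pvContains_false_iff, PySem.Set.mem_add]
              rintro (hxs | hxs)
              · exact absurd hxs (pvContains_false_iff seen x |>.mp (hdis x hx.1))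
              · exact hxv hxs)
            (by
              by_cases hs : PySem.Set.contains seen mn = true
              · right
                rw [PySem.Set.contains_iff, PySem.Set.mem_add]
                exact Or.inl ((PySem.Set.contains_iff seen mn).mp hs)
              · have hmc : mn ∈ cur := hmn.resolve_right hs
                by_cases hmv : mn = v
                · right
                  rw [PySem.Set.contains_iff, PySem.Set.mem_add]
                  exact Or.inr hmv
                · left
                  rw [List.mem_filter]
                  exact ⟨hmc, by simp [hmv]⟩)
            (by
              by_cases hs : PySem.Set.contains seen mx = true
              · right
                rw [PySem.Set.contains_iff, PySem.Set.mem_add]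
                exact Or.inl ((PySem.Set.contains_iff seen mx).mp hs)
              · have hmc : mx ∈ cur := hmx.resolve_right hs
                by_cases hmv : mx = v
                · right
                  rw [PySem.Set.contains_iff, PySem.Set.mem_add]
                  exact Or.inr hmv
                · left
                  rw [List.mem_filter]
                  exact ⟨hmc, by simp [hmv]⟩)
            hb
            (by
              intro x hx
              have hx' := hx
              rw [List.mem_filter] at hx'
              have hxv : x ≠ v := by simpa using hx'.2
              rw [hcnt x hx'.1]
              congr 1
              rw [List.count_filter]
              simp [hxv])]
        rw [hgetv]
        push_cast
        ring

-- ===== VERDICT (by name: the statement is the Claim_ definition above) =====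
theorem stone_game2_spec : Claim_equal_stone_game2 := by
  intro n lst _hdom hpre
  unfold Spec_stone_game2 stone_game2 stone_game2_alt
  obtain ⟨mn, h1⟩ : ∃ m, PySem.List.min? lst (fun x => x) = some m := by
    cases h : PySem.List.min? lst (fun x => x) with
    | none => rw [PySem.List.min?_eq_none_iff] at h; exact absurd h hpre
    | some m => exact ⟨m, rfl⟩
  obtain ⟨mx, h2⟩ : ∃ m, PySem.List.max? lst (fun x => x) = some m := by
    cases h : PySem.List.max? lst (fun x => x) with
    | none => rw [PySem.List.max?_eq_none_iff] at h; exact absurd h hpre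
    | some m => exact ⟨m, rfl⟩
  rw [h1, h2]
  show pvLoopA mn mx n.toNat lst 0
     = min (max n 0) (pvLoopB (PySem.Dict.counter lst) mn mx lst.reverse PySem.Set.empty 0)
  rw [pvLoopA_eq_runA mn mx n.toNat lst 0]
  rw [pvLoopB_eq_classSum mn mx lst.length lst le_rfl PySem.Set.empty 0 (PySem.Dict.counter lst)
      (by intro x _; rw [pvContains_false_iff]; simp [PySem.Set.empty])
      (Or.inl (PySem.List.min?_mem h1))
      (Or.inl (PySem.List.max?_mem h2))
      (by
        rintro ⟨ha, _⟩
        rw [PySem.Set.contains_iff] at ha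
        simp [PySem.Set.empty] at ha)
      (by intro x _; exact PySem.Dict.getD_counter lst x)]
  rw [pvRunA_eq_classSum mn mx lst]
  omega
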